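-- pv_equiv track=rewrite | github.com/alcomist/python-cote_cheatsheet | codes/programmers/42578.py | solution
-- ===== SOURCE A (Python) =====
-- import collections
--
-- def solution(clothes):
--     answer = 1
--
--     part_dic = collections.defaultdict(list)
--
--     for c in clothes:
--         part_dic[c[1]].append(c[0])
--
--     for k, v in part_dic.items():
--         answer *= (len(v)+1)
--
--     return answer-1
-- ===== SOURCE B (Python) =====
-- def solution(clothes):
--     cats = sorted(c[1] for c in clothes)
--     answer = 1
--     run = 0
--     prev = None
--     for k in cats:
--         if k == prev:
--             run += 1
--         else:
--             answer *= run + 1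
--             run = 1
--             prev = k
--     return answer * (run + 1) - 1
-- ===== Notes on version B (the rewrite author's own statement) =====
-- stated objective: alternative
-- what changed: Replaces the defaultdict bucket-grouping plus dict-items pass with a sort of the category keys followed by a single run-length scan that multiplies the answer at each run boundary.
import Mathlib
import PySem

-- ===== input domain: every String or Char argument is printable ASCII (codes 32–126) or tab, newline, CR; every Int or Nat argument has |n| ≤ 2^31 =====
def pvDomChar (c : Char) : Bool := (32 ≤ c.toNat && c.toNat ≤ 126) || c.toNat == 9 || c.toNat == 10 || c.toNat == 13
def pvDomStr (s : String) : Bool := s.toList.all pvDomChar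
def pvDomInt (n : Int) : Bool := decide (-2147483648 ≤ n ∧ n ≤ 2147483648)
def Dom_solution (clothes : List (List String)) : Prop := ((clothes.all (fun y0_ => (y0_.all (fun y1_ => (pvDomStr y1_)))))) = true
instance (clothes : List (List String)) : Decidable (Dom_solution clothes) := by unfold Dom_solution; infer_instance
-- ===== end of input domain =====

-- B replaces A's defaultdict bucket grouping with a sort of the category keys plus one run-length scan (alternative algorithm, similar cost).

-- ===== PORT A =====
def solution (clothes : List (List String)) : Int :=
  let part_dic : PySem.Dict String (List String) :=
    clothes.foldl
      (fun d c => d.modify (PySem.List.pyGetD c 1 "") [] (fun v => v ++ [PySem.List.pyGetD c 0 ""]))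
      PySem.Dict.empty
  let answer : Int :=
    part_dic.items.foldl (fun a kv => a * ((kv.2.length : Int) + 1)) 1
  answer - 1

-- ===== PORT B =====
-- the loop body of Source B: state (answer, run, prev)
def bStep (st : Int × Int × Option String) (k : String) : Int × Int × Option String :=
  if some k = st.2.2 then (st.1, st.2.1 + 1, st.2.2)
  else (st.1 * (st.2.1 + 1), 1, some k)

def solution_alt (clothes : List (List String)) : Int :=
  let cats := PySem.List.sorted (clothes.map (fun c => PySem.List.pyGetD c 1 "")) (fun k => k) false
  let st := cats.foldl bStep (1, 0, none)
  st.1 * (st.2.1 + 1) - 1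

-- ===== PRECONDITION & SPEC =====
-- Pre_ excludes inputs where some inner list has fewer than two entries: there Python A raises IndexError on c[1] (or c[0]).
def Pre_solution (clothes : List (List String)) : Prop := ∀ c ∈ clothes, 2 ≤ c.length
instance (clothes : List (List String)) : Decidable (Pre_solution clothes) := by unfold Pre_solution; infer_instance
def pvWitness_solution : List (List String) := [["a", "x"], ["b", "x"], ["c", "y"]]

def Spec_solution (clothes : List (List String)) (out : Int) : Prop := out = solution_alt clothes
instance (clothes : List (List String)) (out : Int) : Decidable (Spec_solution clothes out) := by unfold Spec_solution; infer_instance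

-- ===== CLAIM (what is proved, stated in full; the proofs are below) =====
def Claim_equal_solution : Prop := ∀ (clothes : List (List String)), Dom_solution clothes → Pre_solution clothes → Spec_solution clothes (solution clothes)

-- ===== LEMMAS AND PROOFS =====

-- both programs compute Π_{k ∈ distinct categories} (count k + 1); name that product
def catProd (l : List String) : Int := ∏ k ∈ l.toFinset, ((l.count k : Int) + 1)

-- multiplying accumulator loop = product of the mapped list
lemma foldl_mul_map_prod {α : Type} (s : List α) (f : α → Int) (a : Int) :
    s.foldl (fun acc x => acc * f x) a = a * (s.map f).prod := by
  induction s generalizing a with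
  | nil => simp
  | cons x t ih => simp [ih, mul_assoc]

-- product over insert, splitting off k's factor
lemma prod_insert_erase (s : Finset String) (k : String) (f : String → Int) :
    (∏ x ∈ insert k s, f x) = f k * ∏ x ∈ s.erase k, f x := by
  by_cases h : k ∈ s
  · rw [Finset.insert_eq_self.mpr h, Finset.mul_prod_erase s f h]
  · rw [Finset.prod_insert h, Finset.erase_eq_self.mpr h]

-- counts of elements other than k are unchanged by consing k
lemma prod_count_cons_ne (k : String) (t : List String) (s : Finset String) (hk : k ∉ s) :
    (∏ j ∈ s, ((List.count j (k :: t) : Int) + 1)) = ∏ j ∈ s, ((List.count j t : Int) + 1) := by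
  apply Finset.prod_congr rfl
  intro j hj
  have hne : j ≠ k := fun h => hk (h ▸ hj)
  simp [hne.symm]

-- the run-length scan on a key-sorted tail computes the product of (count + 1)
lemma scan_spec (l : List String) (hs : l.Pairwise (· ≤ ·)) :
    ∀ (a r : Int) (p : String), (∀ x ∈ l, p ≤ x) →
    (l.foldl bStep (a, r, some p)).1 * ((l.foldl bStep (a, r, some p)).2.1 + 1)
      = a * (r + 1 + (l.count p : Int)) * ∏ k ∈ l.toFinset.erase p, ((l.count k : Int) + 1) := by
  induction l with
  | nil => intro a r p _; simp
  | cons k t ih =>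
    intro a r p hp
    rw [List.pairwise_cons] at hs
    obtain ⟨hk, hst⟩ := hs
    by_cases hkp : k = p
    · subst hkp
      have hstep : bStep (a, r, some k) k = (a, r + 1, some k) := by simp [bStep]
      rw [List.foldl_cons, hstep, ih hst a (r + 1) k hk]
      have he : (k :: t).toFinset.erase k = t.toFinset.erase k := by
        simp [List.toFinset_cons, Finset.erase_insert_eq_erase]
      rw [he, List.count_cons_self,
        prod_count_cons_ne k t (t.toFinset.erase k) (Finset.notMem_erase k _)]
      push_cast
      ring
    · have hpk : p < k := lt_of_le_of_ne (hp k (by simp)) (fun h => hkp h.symm)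
      have hpnot : p ∉ (k :: t) := by
        intro hmem
        rcases List.mem_cons.mp hmem with h | h
        · exact hkp h.symm
        · exact absurd (hk p h) (not_le.mpr hpk)
      have hne : some k ≠ some p := by simpa using hkp
      have hstep : bStep (a, r, some p) k = (a * (r + 1), 1, some k) := by
        simp [bStep, hne]
      rw [List.foldl_cons, hstep, ih hst (a * (r + 1)) 1 k hk]
      have hcp : List.count p (k :: t) = 0 := List.count_eq_zero.mpr hpnot
      have he : (k :: t).toFinset.erase p = insert k t.toFinset := by
        rw [List.toFinset_cons, Finset.erase_eq_self.mpr]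
        simpa using hpnot
      rw [hcp, he, prod_insert_erase, List.count_cons_self,
        prod_count_cons_ne k t (t.toFinset.erase k) (Finset.notMem_erase k _)]
      push_cast
      ring

-- the whole scan, from its initial state (answer=1, run=0, prev=None)
lemma scan_top (l : List String) (hs : l.Pairwise (· ≤ ·)) :
    (l.foldl bStep (1, 0, none)).1 * ((l.foldl bStep (1, 0, none)).2.1 + 1) = catProd l := by
  cases l with
  | nil => simp [catProd]
  | cons k t =>
    rw [List.pairwise_cons] at hs
    have hstep : bStep (1, 0, none) k = (1, 1, some k) := by simp [bStep]
    rw [List.foldl_cons, hstep, scan_spec t hs.2 1 1 k hs.1]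
    unfold catProd
    rw [List.toFinset_cons, prod_insert_erase, List.count_cons_self,
      prod_count_cons_ne k t (t.toFinset.erase k) (Finset.notMem_erase k _)]
    push_cast
    ring

lemma alt_eq_catProd (clothes : List (List String)) :
    solution_alt clothes
      = catProd (PySem.List.sorted (clothes.map (fun c => PySem.List.pyGetD c 1 "")) (fun k => k) false) - 1 := by
  have hB : solution_alt clothes
      = ((PySem.List.sorted (clothes.map (fun c => PySem.List.pyGetD c 1 "")) (fun k => k) false).foldl bStep (1, 0, none)).1
        * (((PySem.List.sorted (clothes.map (fun c => PySem.List.pyGetD c 1 "")) (fun k => k) false).foldl bStep (1, 0, none)).2.1 + 1) - 1 := rfl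
  rw [hB, scan_top _ (by simpa using PySem.List.sorted_pairwise (clothes.map (fun c => PySem.List.pyGetD c 1 "")) (fun k => k))]

lemma sol_eq_catProd (clothes : List (List String)) :
    solution clothes = catProd (clothes.map (fun c => PySem.List.pyGetD c 1 "")) - 1 := by
  have hA : solution clothes
      = (clothes.foldl
          (fun d c => d.modify (PySem.List.pyGetD c 1 "") [] (fun v => v ++ [PySem.List.pyGetD c 0 ""]))
          PySem.Dict.empty).items.foldl (fun a kv => a * ((kv.2.length : Int) + 1)) 1 - 1 := rfl
  have hfold : clothes.foldl
      (fun (d : PySem.Dict String (List String)) c => d.modify (PySem.List.pyGetD c 1 "") [] (fun v => v ++ [PySem.List.pyGetD c 0 ""]))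
      PySem.Dict.empty
      = (clothes.map (fun c => (PySem.List.pyGetD c 1 "", PySem.List.pyGetD c 0 ""))).foldl
          (fun d p => d.modify p.1 [] (fun v => v ++ [p.2])) PySem.Dict.empty := by
    rw [List.foldl_map]
  rw [hA, hfold]
  set l := clothes.map (fun c => (PySem.List.pyGetD c 1 "", PySem.List.pyGetD c 0 "")) with hl
  set d := l.foldl (fun (d : PySem.Dict String (List String)) p => d.modify p.1 [] (fun v => v ++ [p.2])) PySem.Dict.empty with hd
  have hnd : d.keys.Nodup := by
    rw [hd]
    exact PySem.Dict.nodup_keys_foldl_modify_key l Prod.fst [] (fun d p v => v ++ [p.2]) PySem.Dict.empty (by simp [PySem.Dict.keys_empty])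
  have hmem : ∀ x, x ∈ d.keys ↔ x ∈ clothes.map (fun c => PySem.List.pyGetD c 1 "") := by
    intro x
    rw [hd, PySem.Dict.keys_foldl_modify_key l Prod.fst [] (fun d p v => v ++ [p.2]) PySem.Dict.empty]
    show x ∈ PySem.Set.ofList (l.map Prod.fst) ↔ _
    rw [PySem.Set.mem_ofList]
    simp [hl, List.map_map, Function.comp]
  have hget : ∀ k, (d.getD k []).length = List.count k (clothes.map (fun c => PySem.List.pyGetD c 1 "")) := by
    intro k
    rw [hd, PySem.Dict.getD_foldl_modify_append l PySem.Dict.empty k]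
    simp only [PySem.Dict.getD_empty, List.nil_append, List.length_map, hl, List.filter_map,
      List.count, List.countP_map]
    rw [← List.countP_eq_length_filter]
    apply List.countP_congr
    intro c _
    simp [Function.comp, BEq.comm]
  rw [PySem.Dict.items_eq_map_keys d hnd [], foldl_mul_map_prod, List.map_map]
  have hmap : (d.keys.map ((fun kv : String × List String => ((kv.2.length : Int) + 1)) ∘ (fun k => (k, d.getD k []))))
      = d.keys.map (fun k => ((List.count k (clothes.map (fun c => PySem.List.pyGetD c 1 "")) : Int) + 1)) := by
    apply List.map_congr_left
    intro k _
    simp [Function.comp_apply, hget k]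
  rw [hmap, ← List.prod_toFinset _ hnd]
  have hfs : d.keys.toFinset = (clothes.map (fun c => PySem.List.pyGetD c 1 "")).toFinset := by
    apply Finset.ext
    intro x
    simp only [List.mem_toFinset]
    exact hmem x
  rw [hfs]
  unfold catProd
  ring

-- ===== VERDICT (by name: the statement is the Claim_ definition above) =====
theorem solution_spec : Claim_equal_solution := by
  intro clothes _ _
  unfold Spec_solution
  rw [alt_eq_catProd, sol_eq_catProd]
  have hperm : (PySem.List.sorted (clothes.map (fun c => PySem.List.pyGetD c 1 "")) (fun k => k) false).Perm
      (clothes.map (fun c => PySem.List.pyGetD c 1 "")) :=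
    PySem.List.sorted_perm _ _ _
  unfold catProd
  have hfs : (PySem.List.sorted (clothes.map (fun c => PySem.List.pyGetD c 1 "")) (fun k => k) false).toFinset
      = (clothes.map (fun c => PySem.List.pyGetD c 1 "")).toFinset := by
    apply Finset.ext
    intro x
    simp only [List.mem_toFinset]
    exact hperm.mem_iff
  rw [hfs]
  congr 1
  apply Finset.prod_congr rfl
  intro j _
  rw [hperm.count_eq]
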